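-- pv_equiv track=rewrite | github.com/akuwano/databricks-perf-toolkit | dabs/app/routes/schema_analysis.py | _parse_describe_table_extended
-- ===== SOURCE A (Python) =====
-- from typing import Any
--
-- def _parse_describe_table_extended(
--     rows: list[tuple[Any, ...]],
-- ) -> tuple[list[dict[str, str]], list[tuple[Any, ...]]]:
--     """Parse column definitions and retain metadata rows (from first # header onward)."""
--     cols: list[dict[str, str]] = []
--     meta_rows: list[tuple[Any, ...]] = []
--     seen_hash = False
--     for row in rows:
--         col_name = row[0]
--         if col_name is None and not seen_hash:
--             continue
--         name = str(col_name).strip() if col_name is not None else ""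
--         if name.startswith("#"):
--             seen_hash = True
--             meta_rows.append(row)
--             continue
--         if seen_hash:
--             meta_rows.append(row)
--             continue
--         data_type = str(row[1]).strip() if len(row) > 1 and row[1] is not None else ""
--         comment = str(row[2]).strip() if len(row) > 2 and row[2] is not None else ""
--         cols.append({"name": name, "data_type": data_type, "comment": comment})
--     return cols, meta_rows
-- ===== SOURCE B (Python) =====
-- def _parse_describe_table_extended(rows):
--     """Find the first '#' header row, then treat the two segments separately.
--
--     meta_rows = everything from that header on; cols = parsed rows before it.
--     """
--     def _is_header(row):
--         v = row[0]
--         return v is not None and str(v).strip().startswith("#")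
--
--     split = next((i for i, row in enumerate(rows) if _is_header(row)), len(rows))
--     meta_rows = rows[split:]
--     cols = []
--     for row in rows[:split]:
--         if row[0] is None:
--             continue
--         data_type = str(row[1]).strip() if len(row) > 1 and row[1] is not None else ""
--         comment = str(row[2]).strip() if len(row) > 2 and row[2] is not None else ""
--         cols.append({"name": str(row[0]).strip(), "data_type": data_type, "comment": comment})
--     return cols, meta_rows
-- ===== Notes on version B (the rewrite author's own statement) =====
-- stated objective: alternative
-- what changed: Replaces A's single flag-threaded accumulator pass with a find-the-first-header-index decomposition: meta_rows = rows[split:], cols built from rows[:split] only.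
import Mathlib
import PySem

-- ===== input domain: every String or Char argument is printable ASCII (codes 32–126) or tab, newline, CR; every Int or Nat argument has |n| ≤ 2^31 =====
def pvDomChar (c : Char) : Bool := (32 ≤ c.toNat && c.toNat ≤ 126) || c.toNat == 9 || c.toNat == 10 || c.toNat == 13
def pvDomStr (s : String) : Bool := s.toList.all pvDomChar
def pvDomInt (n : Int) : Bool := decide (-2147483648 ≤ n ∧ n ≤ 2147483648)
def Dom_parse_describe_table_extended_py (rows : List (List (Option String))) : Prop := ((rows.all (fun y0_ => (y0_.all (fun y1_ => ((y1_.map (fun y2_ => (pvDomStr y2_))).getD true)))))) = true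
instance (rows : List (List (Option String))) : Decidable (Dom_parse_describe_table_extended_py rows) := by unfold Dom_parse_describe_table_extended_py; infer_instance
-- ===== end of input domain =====

-- B replaces A's flag-threaded single pass by find-first-header-index, then rows[:split] → cols and rows[split:] → mt (alternative decomposition, same cost).


-- ===== PORT A =====
-- row[0] on an empty row raises IndexError in Python; Pre_ excludes empty rows, so
-- the port reads row.headD none there (never reached inside Pre_).
def pvStepA (st : List (List (String × String)) × List (List (Option String)) × Bool)
    (row : List (Option String)) :
    List (List (String × String)) × List (List (Option String)) × Bool :=
  let cols := st.1
  let mt := st.2.1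
  let seen := st.2.2
  let col_name := row.headD none
  if col_name = none ∧ seen = false then st
  else
    let name := match col_name with
      | some s => PySem.Str.strip s
      | none => ""
    if PySem.Str.startswith name "#" then (cols, mt ++ [row], true)
    else if seen then (cols, mt ++ [row], seen)
    else
      let data_type := match PySem.List.pyGet? row 1 with
        | some (some t) => PySem.Str.strip t
        | _ => ""
      let comment := match PySem.List.pyGet? row 2 with
        | some (some t) => PySem.Str.strip t
        | _ => ""
      (cols ++ [[("name", name), ("data_type", data_type), ("comment", comment)]], mt, seen)

def parse_describe_table_extended_py (rows : List (List (Option String))) :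
    (List (List (String × String))) × List (List (Option String)) :=
  let r := rows.foldl pvStepA ([], [], false)
  (r.1, r.2.1)

-- ===== PORT B =====
def pvIsHeader (row : List (Option String)) : Bool :=
  match row.headD none with
  | some s => PySem.Str.startswith (PySem.Str.strip s) "#"
  | none => false

def pvMkCol (row : List (Option String)) : Option (List (String × String)) :=
  match row.headD none with
  | none => none
  | some s =>
    let data_type := match PySem.List.pyGet? row 1 with
      | some (some t) => PySem.Str.strip t
      | _ => ""
    let comment := match PySem.List.pyGet? row 2 with
      | some (some t) => PySem.Str.strip t
      | _ => ""
    some [("name", PySem.Str.strip s), ("data_type", data_type), ("comment", comment)]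

def parse_describe_table_extended_py_alt (rows : List (List (Option String))) :
    (List (List (String × String))) × List (List (Option String)) :=
  let split := rows.findIdx pvIsHeader
  ((rows.take split).filterMap pvMkCol, rows.drop split)

-- ===== PRECONDITION & SPEC =====
-- Pre_ excludes inputs containing an empty row: Python A raises IndexError on row[0] there.
def Pre_parse_describe_table_extended_py (rows : List (List (Option String))) : Prop :=
  rows.all (fun r => !r.isEmpty) = true
instance (rows : List (List (Option String))) : Decidable (Pre_parse_describe_table_extended_py rows) := by unfold Pre_parse_describe_table_extended_py; infer_instance

def pvWitness_parse_describe_table_extended_py : List (List (Option String)) :=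
  [[some "a", some "int", none], [some "# Detailed Table Information", none], [none, some "x"]]

def Spec_parse_describe_table_extended_py (rows : List (List (Option String))) (out : (List (List (String × String))) × List (List (Option String))) : Prop := out = parse_describe_table_extended_py_alt rows
instance (rows : List (List (Option String))) (out : (List (List (String × String))) × List (List (Option String))) : Decidable (Spec_parse_describe_table_extended_py rows out) := by unfold Spec_parse_describe_table_extended_py; infer_instance

-- ===== CLAIM (what is proved, stated in full; the proofs are below) =====
def Claim_equal_parse_describe_table_extended_py : Prop := ∀ (rows : List (List (Option String))), Dom_parse_describe_table_extended_py rows → Pre_parse_describe_table_extended_py rows → Spec_parse_describe_table_extended_py rows (parse_describe_table_extended_py rows)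

-- ===== LEMMAS AND PROOFS =====

-- Once the flag is set, A's loop only appends every remaining row to mt.
theorem pvFoldA_seen (rows : List (List (Option String)))
    (cols : List (List (String × String))) (mt : List (List (Option String))) :
    rows.foldl pvStepA (cols, mt, true) = (cols, mt ++ rows, true) := by
  induction rows generalizing mt with
  | nil => simp
  | cons r rest ih =>
    have hstep : pvStepA (cols, mt, true) r = (cols, mt ++ [r], true) := by
      simp only [pvStepA]
      split
      · next h => exact absurd h.2 (by simp)
      · split <;> simp
    simp only [List.foldl_cons, hstep, ih]
    simp

-- Before the flag is set, A's loop is B's split decomposition.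
theorem pvFoldA_unseen (rows : List (List (Option String)))
    (cols : List (List (String × String))) (mt : List (List (Option String))) :
    rows.foldl pvStepA (cols, mt, false) =
      (cols ++ (rows.take (rows.findIdx pvIsHeader)).filterMap pvMkCol,
       mt ++ rows.drop (rows.findIdx pvIsHeader),
       rows.any pvIsHeader) := by
  induction rows generalizing cols mt with
  | nil => simp
  | cons r rest ih =>
    by_cases hh : pvIsHeader r = true
    · have hs := hh
      simp only [pvIsHeader] at hs
      cases hcn : r.headD none with
      | none => rw [hcn] at hs; exact absurd hs (by simp)
      | some s =>
        rw [hcn] at hs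
        simp only at hs
        simp only [pysem] at hs
        rw [show "#".toList = ['#'] from rfl] at hs
        have hstep : pvStepA (cols, mt, false) r = (cols, mt ++ [r], true) := by
          simp only [pvStepA, hcn]
          simp [PySem.Chars.startswith_iff, hs]
        simp only [List.foldl_cons, hstep, pvFoldA_seen]
        simp [List.findIdx_cons, hh]
    · have hfind : (r :: rest).findIdx pvIsHeader = rest.findIdx pvIsHeader + 1 := by
        simp [List.findIdx_cons, hh]
      rw [hfind]
      simp only [List.foldl_cons, List.take_succ_cons, List.drop_succ_cons]
      cases hcn : r.headD none with
      | none =>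
        have hstep : pvStepA (cols, mt, false) r = (cols, mt, false) := by
          simp only [pvStepA, hcn]
          simp
        have hmk : pvMkCol r = none := by simp only [pvMkCol, hcn]
        rw [hstep, ih]
        simp [hmk, hh]
      | some s =>
        have hns : PySem.Str.startswith (PySem.Str.strip s) "#" = false := by
          have := hh
          simp only [pvIsHeader, hcn] at this
          exact Bool.eq_false_iff.mpr this
        have hns' := hns
        simp only [pysem] at hns'
        rw [show "#".toList = ['#'] from rfl] at hns'
        have hstep : pvStepA (cols, mt, false) r =
            (cols ++ [[("name", PySem.Str.strip s),
              ("data_type", match PySem.List.pyGet? r 1 with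
                | some (some t) => PySem.Str.strip t | _ => ""),
              ("comment", match PySem.List.pyGet? r 2 with
                | some (some t) => PySem.Str.strip t | _ => "")]], mt, false) := by
          simp only [pvStepA, hcn]
          simp [hns']
        have hmk : pvMkCol r = some [("name", PySem.Str.strip s),
              ("data_type", match PySem.List.pyGet? r 1 with
                | some (some t) => PySem.Str.strip t | _ => ""),
              ("comment", match PySem.List.pyGet? r 2 with
                | some (some t) => PySem.Str.strip t | _ => "")] := by
          simp only [pvMkCol, hcn]
        rw [hstep, ih]
        simp [hmk, hh]

-- ===== VERDICT (by name: the statement is the Claim_ definition above) =====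
theorem parse_describe_table_extended_py_spec : Claim_equal_parse_describe_table_extended_py := by
  intro rows _ _
  unfold Spec_parse_describe_table_extended_py
  unfold parse_describe_table_extended_py parse_describe_table_extended_py_alt
  rw [pvFoldA_unseen]
  simp
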